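-- pv_equiv track=rewrite | github.com/yongjunchai/algorithms-illuminated | algorithmIlliminated_3/dp.py | wis_dp_iterative
-- ===== SOURCE A (Python) =====
-- def wis_dp_iterative(values):
--     subProblemSolutions = [None for i in range(len(values) + 1)]
--     subProblemSolutions[0] = 0
--     subProblemSolutions[1] = values[0]
--     for i in range(2, len(values) + 1):
--         if subProblemSolutions[i - 1] > subProblemSolutions[i - 2] + values[i - 1]:
--             subProblemSolutions[i] = subProblemSolutions[i - 1]
--         else:
--             subProblemSolutions[i] = subProblemSolutions[i - 2] + values[i - 1]
--     return subProblemSolutions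
-- ===== SOURCE B (Python) =====
-- def wis_dp_iterative(values):
--     # top-down memoization driven by an explicit stack (no deep recursion)
--     n = len(values)
--     memo = [None] * (n + 1)
--     memo[0] = 0
--     memo[1] = values[0]
--     stack = [n]
--     while stack:
--         i = stack[-1]
--         if i < 2 or memo[i] is not None:
--             stack.pop()
--         elif memo[i - 1] is None:
--             stack.append(i - 1)
--         else:
--             memo[i] = max(memo[i - 1], memo[i - 2] + values[i - 1])
--             stack.pop()
--     return memo
-- ===== Notes on version B (the rewrite author's own statement) =====
-- stated objective: alternative
-- what changed: Replaces A's bottom-up for-loop over indices with top-down demand-driven memoization: an explicit work stack starts at n, pushes unresolved subproblems i-1, and fills memo entries only when their dependencies are resolved.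
import Mathlib
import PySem

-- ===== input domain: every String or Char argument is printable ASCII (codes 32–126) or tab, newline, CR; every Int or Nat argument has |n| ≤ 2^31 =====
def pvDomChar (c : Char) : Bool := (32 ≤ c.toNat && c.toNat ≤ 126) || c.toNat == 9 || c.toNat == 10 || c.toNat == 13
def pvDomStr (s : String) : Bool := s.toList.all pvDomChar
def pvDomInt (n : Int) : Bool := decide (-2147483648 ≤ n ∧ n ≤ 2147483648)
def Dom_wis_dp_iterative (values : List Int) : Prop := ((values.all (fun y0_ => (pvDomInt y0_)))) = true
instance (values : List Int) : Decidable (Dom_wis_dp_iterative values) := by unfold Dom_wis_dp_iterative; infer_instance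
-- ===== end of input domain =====

-- B replaces A's bottom-up index loop with top-down memoization driven by an explicit work stack (alternative decomposition, same O(n) cost).


-- ===== PORT A =====
-- one iteration of A's range(2, n+1) loop: s[i] = max-choice read by index from s and values
def stepA (values : List Int) (s : List Int) (i : Int) : List Int :=
  let a := (PySem.List.pyGet? s (i - 1)).getD 0
  let b := (PySem.List.pyGet? s (i - 2)).getD 0 + (PySem.List.pyGet? values (i - 1)).getD 0
  if a > b then s ++ [a] else s ++ [b]

def wis_dp_iterative (values : List Int) : List Int :=
  -- subProblemSolutions[0] = 0; subProblemSolutions[1] = values[0]  (values[0] raises on []: excluded by Pre_)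
  let init : List Int := [0, (PySem.List.pyGet? values 0).getD 0]
  (PySem.List.pyRange 2 ((values.length : Int) + 1) 1).foldl (stepA values) init

-- ===== PORT B =====
-- B's 'while stack:' loop; fuel only makes the loop total (2n+2 steps always suffice, proved below).
-- memo entries are Option Int (None ↔ none); all indices touched are nonnegative, so Nat indices are exact.
def wisLoop (values : List Int) : Nat → List Nat → List (Option Int) → List (Option Int)
  | 0, _, memo => memo
  | _ + 1, [], memo => memo
  | fuel + 1, i :: rest, memo =>
    if i < 2 ∨ (memo.getD i none).isSome then
      wisLoop values fuel rest memo                                   -- stack.pop()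
    else if (memo.getD (i - 1) none).isNone then
      wisLoop values fuel ((i - 1) :: i :: rest) memo                 -- stack.append(i-1)
    else
      let v := max ((memo.getD (i - 1) none).getD 0)
                   ((memo.getD (i - 2) none).getD 0 + values.getD (i - 1) 0)
      wisLoop values fuel rest (memo.set i (some v))                  -- memo[i] = …; stack.pop()

def wis_dp_iterative_alt (values : List Int) : List Int :=
  let n := values.length
  -- memo = [None]*(n+1); memo[0] = 0; memo[1] = values[0]   (values[0] raises on []: excluded by Pre_)
  let memo0 : List (Option Int) :=
    ((List.replicate (n + 1) (none : Option Int)).set 0 (some 0)).set 1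
      (some ((PySem.List.pyGet? values 0).getD 0))
  (wisLoop values (2 * n + 2) [n] memo0).map (fun o => o.getD 0)      -- returned memo holds only ints

-- ===== PRECONDITION & SPEC =====
-- A (and B) raise IndexError on the empty list (values[0]); Pre_ excludes exactly that input.
def Pre_wis_dp_iterative (values : List Int) : Prop := values ≠ []
instance (values : List Int) : Decidable (Pre_wis_dp_iterative values) := by unfold Pre_wis_dp_iterative; infer_instance
def pvWitness_wis_dp_iterative : List Int := [3, 2, 1, 6, 4, 5]

def Spec_wis_dp_iterative (values : List Int) (out : List Int) : Prop := out = wis_dp_iterative_alt values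
instance (values : List Int) (out : List Int) : Decidable (Spec_wis_dp_iterative values out) := by unfold Spec_wis_dp_iterative; infer_instance

-- ===== CLAIM (what is proved, stated in full; the proofs are below) =====
def Claim_equal_wis_dp_iterative : Prop := ∀ (values : List Int), Dom_wis_dp_iterative values → Pre_wis_dp_iterative values → Spec_wis_dp_iterative values (wis_dp_iterative values)

-- ===== LEMMAS AND PROOFS =====

-- the DP recurrence both programs compute
def fA (values : List Int) : Nat → Int
  | 0 => 0
  | 1 => values.getD 0 0
  | (j + 2) => max (fA values (j + 1)) (fA values j + values.getD (j + 1) 0)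

-- memo after entries 0..k-1 are filled
def memoK (values : List Int) (k : Nat) : List (Option Int) :=
  (List.range (values.length + 1)).map (fun j => if j < k then some (fA values j) else none)

theorem memoK_getD (values : List Int) (k j : Nat) :
    (memoK values k).getD j none
      = if j < k ∧ j ≤ values.length then some (fA values j) else none := by
  unfold memoK
  rcases Nat.lt_or_ge j (values.length + 1) with h | h
  · rw [List.getD_eq_getElem?_getD]
    simp only [List.getElem?_map, List.getElem?_range h, Option.map_some]
    by_cases hk : j < k <;> simp [hk, Nat.lt_succ_iff.mp h]
  · rw [List.getD_eq_getElem?_getD]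
    rw [List.getElem?_eq_none (by simpa using h)]
    simp; omega

theorem memoK_set (values : List Int) (k : Nat) (_hk : k ≤ values.length) :
    (memoK values k).set k (some (fA values k)) = memoK values (k + 1) := by
  unfold memoK
  apply List.ext_getElem?
  intro j
  rcases Nat.lt_or_ge j (values.length + 1) with h | h
  · rw [List.getElem?_set]
    simp only [List.length_map, List.length_range, List.getElem?_map, List.getElem?_range h,
      Option.map_some]
    by_cases hjk : k = j
    · subst hjk; simp [h]
    · have : j ≠ k := fun e => hjk e.symm
      by_cases h2 : j < k
      · simp [hjk, h2, Nat.lt_succ_of_lt h2]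
      · have : ¬ j < k + 1 := by omega
        simp [hjk, h2, this]
  · rw [List.getElem?_eq_none, List.getElem?_eq_none] <;> simp <;> omega

-- ascent phase: the stack is [k, k+1, …, n], each step resolves the top entry
theorem ascend (values : List Int) : ∀ (len k fuel : Nat),
    k = values.length + 1 - len → 2 ≤ k → len ≤ fuel →
    wisLoop values fuel (List.range' k len) (memoK values k) = memoK values (values.length + 1) := by
  intro len
  induction len with
  | zero =>
    intro k fuel hk _ _
    have : k = values.length + 1 := by omega
    subst this
    cases fuel <;> simp [wisLoop]
  | succ m ih =>
    intro k fuel hk h2 hfuel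
    have hkn : k ≤ values.length := by omega
    obtain ⟨f', rfl⟩ : ∃ f', fuel = f' + 1 := ⟨fuel - 1, by omega⟩
    rw [List.range'_succ]
    show wisLoop values (f' + 1) (k :: List.range' (k + 1) m) (memoK values k) = _
    unfold wisLoop
    rw [memoK_getD, memoK_getD, memoK_getD]
    have g1 : ¬ (k < k ∧ k ≤ values.length) := by omega
    have g2 : (k - 1 < k ∧ k - 1 ≤ values.length) := by omega
    have g3 : (k - 2 < k ∧ k - 2 ≤ values.length) := by omega
    rw [if_neg g1, if_pos g2, if_pos g3]
    simp only [Option.isSome_none, Option.isNone_some, Option.getD_some]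
    have hlt : ¬ (k < 2 ∨ (false : Bool) = true) := by simp; omega
    rw [if_neg (by simpa using hlt), if_neg (by simp)]
    have hf : max (fA values (k - 1)) (fA values (k - 2) + values.getD (k - 1) 0) = fA values k := by
      obtain ⟨j, rfl⟩ : ∃ j, k = j + 2 := ⟨k - 2, by omega⟩
      simp [fA]
    rw [hf, memoK_set values k hkn]
    exact ih (k + 1) f' (by omega) (by omega) (by omega)

-- descent phase: unresolved subproblems k-1, k-2, … are pushed until index 2 is on top
theorem descend (values : List Int) : ∀ (d fuel : Nat) (rest : List Nat),
    d + 2 ≤ values.length → d ≤ fuel →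
    wisLoop values fuel ((d + 2) :: rest) (memoK values 2)
      = wisLoop values (fuel - d) (List.range' 2 (d + 1) ++ rest) (memoK values 2) := by
  intro d
  induction d with
  | zero => intro fuel rest _ _; simp [List.range'_one]
  | succ m ih =>
    intro fuel rest hle hfuel
    obtain ⟨f', rfl⟩ : ∃ f', fuel = f' + 1 := ⟨fuel - 1, by omega⟩
    rw [show m + 1 + 2 = m + 3 from rfl]
    conv_lhs => rw [wisLoop]
    rw [memoK_getD, memoK_getD]
    have g1 : ¬ (m + 3 < 2 ∧ m + 3 ≤ values.length) := by omega
    have g2 : ¬ (m + 3 - 1 < 2 ∧ m + 3 - 1 ≤ values.length) := by omega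
    rw [if_neg g1, if_neg g2]
    rw [if_neg (by simp), if_pos (by simp)]
    have h31 : m + 3 - 1 = m + 2 := by omega
    rw [h31, ih f' ((m + 3) :: rest) (by omega) (by omega)]
    have hr : List.range' 2 (m + 1) ++ (m + 3) :: rest
        = (List.range' 2 (m + 2) ++ rest) := by
      conv_rhs => rw [List.range'_concat]
      simp
      omega
    rw [hr, show f' - m = f' + 1 - (m + 1) from by omega,
      show m + 2 = m + 1 + 1 from by omega]

-- B's initial memo is memoK 2
theorem memo0_eq (values : List Int) (h : values ≠ []) :
    ((List.replicate (values.length + 1) (none : Option Int)).set 0 (some 0)).set 1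
        (some ((PySem.List.pyGet? values 0).getD 0))
      = memoK values 2 := by
  have hn : 1 ≤ values.length := by
    cases values with
    | nil => exact absurd rfl h
    | cons a l => simp
  have hv : (PySem.List.pyGet? values 0).getD 0 = values.getD 0 0 := by
    have h0 : (PySem.List.pyGet? values ((0 : Nat) : Int)) = values[(0 : Nat)]? := by
      exact PySem.List.pyGet?_natCast values 0
    simp only [Nat.cast_zero] at h0
    rw [h0, List.getD_eq_getElem?_getD]
  rw [hv]
  apply List.ext_getElem?
  intro j
  unfold memoK
  rcases Nat.lt_or_ge j (values.length + 1) with hj | hj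
  · rw [List.getElem?_set, List.getElem?_set]
    simp only [List.length_set, List.length_replicate, List.getElem?_replicate,
      List.getElem?_map, List.getElem?_range hj, Option.map_some]
    match j, hj with
    | 0, _ => simp [fA]
    | 1, _ => simp [fA, h]
    | (m + 2), hj => simp [hj]
  · rw [List.getElem?_eq_none, List.getElem?_eq_none] <;> simp <;> omega

-- B computes the DP table f over 0..n
theorem alt_eq (values : List Int) (h : values ≠ []) :
    wis_dp_iterative_alt values = (List.range (values.length + 1)).map (fA values) := by
  have hn : 1 ≤ values.length := by
    cases values with
    | nil => exact absurd rfl h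
    | cons a l => simp
  show (wisLoop values (2 * values.length + 2) [values.length]
      (((List.replicate (values.length + 1) (none : Option Int)).set 0 (some 0)).set 1
        (some ((PySem.List.pyGet? values 0).getD 0)))).map (fun o => o.getD 0) = _
  rw [memo0_eq values h]
  have hfinal : wisLoop values (2 * values.length + 2) [values.length] (memoK values 2)
      = memoK values (values.length + 1) := by
    rcases Nat.lt_or_ge values.length 2 with h2 | h2
    · -- n = 1: top index is 1 < 2, popped at once; memoK 2 is already full
      have : values.length = 1 := by omega
      rw [this]
      show wisLoop values 4 [1] (memoK values 2) = memoK values 2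
      unfold wisLoop
      rw [if_pos (Or.inl (by omega))]
      simp [wisLoop]
    · -- n ≥ 2: descend then ascend
      obtain ⟨d, hd⟩ : ∃ d, values.length = d + 2 := ⟨values.length - 2, by omega⟩
      rw [hd]
      rw [show [d + 2] = (d + 2) :: ([] : List Nat) from rfl]
      rw [descend values d (2 * (d + 2) + 2) [] (by omega) (by omega)]
      rw [List.append_nil]
      have has := ascend values (d + 1) 2 (2 * (d + 2) + 2 - d) (by omega) (by omega) (by omega)
      rw [hd] at has
      exact has
  rw [hfinal]
  unfold memoK
  rw [List.map_map]
  apply List.map_congr_left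
  intro j hj
  simp only [List.mem_range] at hj
  simp [hj, Function.comp]

-- A's fold computes the same table: invariant over the remaining range(k, n+1)
theorem foldA (values : List Int) : ∀ (m k : Nat),
    k = values.length + 1 - m → 2 ≤ k →
    (PySem.List.pyRange (k : Int) ((values.length : Int) + 1) 1).foldl (stepA values)
        ((List.range k).map (fA values))
      = (List.range (values.length + 1)).map (fA values) := by
  intro m
  induction m with
  | zero =>
    intro k hk _
    have : k = values.length + 1 := by omega
    subst this
    rw [PySem.List.pyRange_one_eq_nil (by omega)]
    simp
  | succ m ih =>
    intro k hk h2
    have hkn : k ≤ values.length := by omega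
    rw [PySem.List.pyRange_one_cons (by exact_mod_cast Nat.lt_succ_of_le hkn)]
    simp only [List.foldl_cons]
    have hstep : stepA values ((List.range k).map (fA values)) (k : Int)
        = (List.range (k + 1)).map (fA values) := by
      unfold stepA
      have h1 : (k : Int) - 1 = ((k - 1 : Nat) : Int) := by omega
      have h2' : (k : Int) - 2 = ((k - 2 : Nat) : Int) := by omega
      rw [h1, h2']
      simp only [PySem.List.pyGet?_natCast]
      have e1 : ((List.range k).map (fA values))[k - 1]? = some (fA values (k - 1)) := by
        rw [List.getElem?_map, List.getElem?_range (by omega)]; rfl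
      have e2 : ((List.range k).map (fA values))[k - 2]? = some (fA values (k - 2)) := by
        rw [List.getElem?_map, List.getElem?_range (by omega)]; rfl
      have e3 : values[k - 1]? = some (values.getD (k - 1) 0) := by
        rw [List.getD_eq_getElem?_getD, List.getElem?_eq_getElem (by omega)]
        rfl
      rw [e1, e2, e3]
      simp only [Option.getD_some]
      have hf : fA values k = max (fA values (k - 1)) (fA values (k - 2) + values.getD (k - 1) 0) := by
        obtain ⟨j, rfl⟩ : ∃ j, k = j + 2 := ⟨k - 2, by omega⟩
        simp [fA]
      rw [List.range_succ, List.map_append]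
      by_cases hc : fA values (k - 2) + values.getD (k - 1) 0 < fA values (k - 1)
      · rw [if_pos hc]
        simp only [List.map_cons, List.map_nil]
        rw [hf, max_eq_left (le_of_lt hc)]
      · rw [if_neg hc]
        simp only [List.map_cons, List.map_nil]
        rw [hf, max_eq_right (by omega)]
    rw [hstep]
    exact ih (k + 1) (by omega) (by omega)

theorem a_eq (values : List Int) (h : values ≠ []) :
    wis_dp_iterative values = (List.range (values.length + 1)).map (fA values) := by
  have hn : 1 ≤ values.length := by
    cases values with
    | nil => exact absurd rfl h
    | cons a l => simp
  unfold wis_dp_iterative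
  have hinit : [(0 : Int), (PySem.List.pyGet? values 0).getD 0]
      = (List.range 2).map (fA values) := by
    have h0 : (PySem.List.pyGet? values ((0 : Nat) : Int)) = values[(0 : Nat)]? := by
      exact PySem.List.pyGet?_natCast values 0
    simp only [Nat.cast_zero] at h0
    rw [h0]
    simp [List.range_succ, fA, List.getD_eq_getElem?_getD]
  rw [hinit]
  exact foldA values (values.length - 1) 2 (by omega) (by omega)

-- ===== VERDICT (by name: the statement is the Claim_ definition above) =====
theorem wis_dp_iterative_spec : Claim_equal_wis_dp_iterative := by
  intro values _ hpre
  unfold Spec_wis_dp_iterative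
  rw [a_eq values hpre, alt_eq values hpre]
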